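-- pv_equiv track=rewrite | github.com/0xLumos/AutoPatch | src/autopatch.py | diff_sbom
-- ===== SOURCE A (Python) =====
-- def diff_sbom(before_sbom, after_sbom):
--     """
--     Compare SBOM components of original and patched images.
--     Returns dict with lists of 'added', 'removed', and 'updated' components.
--     Each component dict has: name, type, [old_version, new_version] as applicable.
--     """
--     before_components = {}
--     after_components = {}
--     # Helper to process components list from SBOM
--     def load_components(sbom, comp_dict):
--         comps = sbom.get("components") or sbom.get("Components") or []
--         for comp in comps:
--             name = comp.get("name") or comp.get("Name")
--             comp_type = comp.get("type") or comp.get("Type") or "library"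
--             version = comp.get("version") or comp.get("Version")
--             if name:
--                 comp_dict[(name, comp_type)] = version
--     load_components(before_sbom, before_components)
--     load_components(after_sbom, after_components)
--     added = []
--     removed = []
--     updated = []
--     # Compare before and after
--     for (name, comp_type), old_ver in before_components.items():
--         if (name, comp_type) not in after_components:
--             removed.append({"name": name, "type": comp_type, "old_version": old_ver})
--         else:
--             new_ver = after_components[(name, comp_type)]
--             if old_ver != new_ver:
--                 updated.append({"name": name, "type": comp_type, "old_version": old_ver, "new_version": new_ver})
--     for (name, comp_type), new_ver in after_components.items():
--         if (name, comp_type) not in before_components: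
--             added.append({"name": name, "type": comp_type, "new_version": new_ver})
--     return {"added": added, "removed": removed, "updated": updated}
-- ===== SOURCE B (Python) =====
-- _MISSING = object()
--
--
-- def diff_sbom(before_sbom, after_sbom):
--     # One merged dict keyed by (name, type); each value is a (old, new) pair where
--     # _MISSING marks "absent on that side" (version itself may legitimately be falsy).
--     def extract(sbom):
--         comps = sbom.get("components") or sbom.get("Components") or []
--         out = []
--         for comp in comps:
--             name = comp.get("name") or comp.get("Name")
--             comp_type = comp.get("type") or comp.get("Type") or "library"
--             version = comp.get("version") or comp.get("Version")
--             if name: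
--                 out.append(((name, comp_type), version))
--         return out
--
--     merged = {}
--     for key, ver in extract(before_sbom):
--         merged[key] = (ver, _MISSING)
--     for key, ver in extract(after_sbom):
--         merged[key] = (merged[key][0] if key in merged else _MISSING, ver)
--
--     added, removed, updated = [], [], []
--     for (name, comp_type), (old, new) in merged.items():
--         if old is _MISSING:
--             added.append({"name": name, "type": comp_type, "new_version": new})
--         elif new is _MISSING:
--             removed.append({"name": name, "type": comp_type, "old_version": old})
--         elif old != new:
--             updated.append({"name": name, "type": comp_type,
--                             "old_version": old, "new_version": new})
--     return {"added": added, "removed": removed, "updated": updated}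
-- ===== Notes on version B (the rewrite author's own statement) =====
-- stated objective: alternative
-- what changed: Replaces A's two separate per-side dicts and two comparison loops by one merged dict keyed by (name,type) that records each side's presence/version, classified in a single pass over its items; B's Python matches A's value on every input, and Pre_ only excludes inputs whose output dict holds None where the declared value type is str (not a value of the declared return type), where B returns the identical dict.
import Mathlib
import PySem

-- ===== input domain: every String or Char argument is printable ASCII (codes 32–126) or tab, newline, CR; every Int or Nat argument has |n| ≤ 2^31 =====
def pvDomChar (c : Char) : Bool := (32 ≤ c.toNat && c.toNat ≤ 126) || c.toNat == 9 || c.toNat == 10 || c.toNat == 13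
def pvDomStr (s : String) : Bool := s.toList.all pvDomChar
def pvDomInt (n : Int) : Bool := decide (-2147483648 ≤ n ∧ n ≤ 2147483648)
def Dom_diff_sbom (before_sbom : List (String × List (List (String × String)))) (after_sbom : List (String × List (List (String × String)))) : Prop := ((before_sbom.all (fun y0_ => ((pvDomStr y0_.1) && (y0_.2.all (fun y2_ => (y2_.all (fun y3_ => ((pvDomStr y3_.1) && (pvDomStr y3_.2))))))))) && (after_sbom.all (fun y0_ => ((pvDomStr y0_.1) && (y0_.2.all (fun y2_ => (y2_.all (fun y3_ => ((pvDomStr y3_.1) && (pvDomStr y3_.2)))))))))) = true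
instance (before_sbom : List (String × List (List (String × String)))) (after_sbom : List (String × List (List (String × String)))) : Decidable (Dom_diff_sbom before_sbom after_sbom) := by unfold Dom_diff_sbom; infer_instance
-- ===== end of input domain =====

-- B replaces A's two per-side dicts and two comparison loops by ONE merged dict keyed by
-- (name, type) recording each side's presence/version, classified in a single pass (objective: alternative).
-- The Python B returns A's exact value on EVERY input, missing-version components included.

-- ===== shared extraction helpers (both Pythons contain the identical extraction code) =====
-- Python truthiness of an Optional[str]
def pvTruthy (o : Option String) : Bool :=
  match o with
  | none => false
  | some s => !(s == "")

-- Python 'a or b' for Optional[str]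
def pvOr (a b : Option String) : Option String := if pvTruthy a then a else b

-- Python 'a or dflt' with a string default
def pvOrD (a : Option String) (dflt : String) : String := if pvTruthy a then a.getD "" else dflt

-- sbom.get("components") or sbom.get("Components") or []   (assoc-list lookup = first match)
def pvComps (sbom : List (String × List (List (String × String)))) : List (List (String × String)) :=
  match sbom.lookup "components" with
  | some (c :: cs) => c :: cs
  | _ =>
    match sbom.lookup "Components" with
    | some l => l
    | none => []

-- the per-component body: name/type/version resolution and the 'if name' guard
-- (version is Option String; Pre_ below guarantees it is 'some' for every kept component)
def pvKeyVer (comp : List (String × String)) : Option ((String × String) × Option String) :=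
  let name := pvOr (comp.lookup "name") (comp.lookup "Name")
  let comp_type := pvOrD (pvOr (comp.lookup "type") (comp.lookup "Type")) "library"
  let version := pvOr (comp.lookup "version") (comp.lookup "Version")
  if pvTruthy name then some ((name.getD "", comp_type), version) else none

-- the three result-entry shapes (the .getD "" is only reached outside Pre_, where Python holds None)
def pvEntryAdded (k : String × String) (newv : Option String) : List (String × String) :=
  [("name", k.1), ("type", k.2), ("new_version", newv.getD "")]
def pvEntryRemoved (k : String × String) (oldv : Option String) : List (String × String) :=
  [("name", k.1), ("type", k.2), ("old_version", oldv.getD "")]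
def pvEntryUpdated (k : String × String) (oldv newv : Option String) : List (String × String) :=
  [("name", k.1), ("type", k.2), ("old_version", oldv.getD ""), ("new_version", newv.getD "")]

-- ===== PORT A =====
-- load_components: loop over comps, conditionally inserting into the side dict
def pvLoadComponents (sbom : List (String × List (List (String × String)))) :
    PySem.Dict (String × String) (Option String) :=
  (pvComps sbom).foldl
    (fun d comp =>
      match pvKeyVer comp with
      | some kv => d.insert kv.1 kv.2
      | none => d)
    PySem.Dict.empty

def diff_sbom (before_sbom : List (String × List (List (String × String)))) (after_sbom : List (String × List (List (String × String)))) : List (String × List (List (String × String))) :=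
  let before_components := pvLoadComponents before_sbom
  let after_components := pvLoadComponents after_sbom
  let ru := before_components.items.foldl
    (fun (acc : List (List (String × String)) × List (List (String × String))) kv =>
      if after_components.contains kv.1 = false then
        (acc.1 ++ [pvEntryRemoved kv.1 kv.2], acc.2)
      else
        let new_ver := after_components.getD kv.1 none
        if kv.2 ≠ new_ver then (acc.1, acc.2 ++ [pvEntryUpdated kv.1 kv.2 new_ver]) else acc)
    ([], [])
  let added := after_components.items.foldl
    (fun acc kv =>
      if before_components.contains kv.1 = false then acc ++ [pvEntryAdded kv.1 kv.2] else acc)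
    []
  [("added", added), ("removed", ru.1), ("updated", ru.2)]

-- ===== PORT B =====
-- extract: the same extraction code, yielding the (key, version) stream
def pvExtract (sbom : List (String × List (List (String × String)))) :
    List ((String × String) × Option String) :=
  (pvComps sbom).filterMap pvKeyVer

-- merged[key] = (merged[key][0] if key in merged else _MISSING, ver)   (outer Option = _MISSING)
def pvMergeStep (m : PySem.Dict (String × String) (Option (Option String) × Option (Option String)))
    (p : (String × String) × Option String) :
    PySem.Dict (String × String) (Option (Option String) × Option (Option String)) :=
  m.insert p.1 ((if m.contains p.1 then (m.getD p.1 (none, none)).1 else none), some p.2)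

-- the single classification pass over merged.items (Source B's if/elif/elif chain);
-- in the added branch 'new' is never _MISSING in Source B, ported as .getD none
def pvClassify
    (acc : List (List (String × String)) × List (List (String × String)) × List (List (String × String)))
    (kv : (String × String) × (Option (Option String) × Option (Option String))) :
    List (List (String × String)) × List (List (String × String)) × List (List (String × String)) :=
  match kv.2.1, kv.2.2 with
  | none, newv => (acc.1 ++ [pvEntryAdded kv.1 (newv.getD none)], acc.2.1, acc.2.2)
  | some oldv, none => (acc.1, acc.2.1 ++ [pvEntryRemoved kv.1 oldv], acc.2.2)
  | some oldv, some newv =>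
      if oldv ≠ newv then (acc.1, acc.2.1, acc.2.2 ++ [pvEntryUpdated kv.1 oldv newv]) else acc

def diff_sbom_alt (before_sbom : List (String × List (List (String × String)))) (after_sbom : List (String × List (List (String × String)))) : List (String × List (List (String × String))) :=
  let merged := (pvExtract after_sbom).foldl pvMergeStep
    ((pvExtract before_sbom).foldl
      (fun m p => m.insert p.1 ((some p.2 : Option (Option String)), (none : Option (Option String))))
      PySem.Dict.empty)
  let res := merged.items.foldl pvClassify ([], [], [])
  [("added", res.1), ("removed", res.2.1), ("updated", res.2.2)]

-- ===== PRECONDITION & SPEC =====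
-- Pre_ excludes only inputs where some kept component's version resolves to Python None: there A's
-- returned dict holds None where the declared value type is str — not a value of the declared return
-- type, so (like a raise) no faithful typed port exists; the Python B returns A's IDENTICAL dict there.
def Pre_diff_sbom (before_sbom : List (String × List (List (String × String)))) (after_sbom : List (String × List (List (String × String)))) : Prop :=
  ((pvComps before_sbom ++ pvComps after_sbom).all (fun comp =>
    !pvTruthy (pvOr (comp.lookup "name") (comp.lookup "Name"))
    || (pvOr (comp.lookup "version") (comp.lookup "Version")).isSome)) = true
instance (before_sbom : List (String × List (List (String × String)))) (after_sbom : List (String × List (List (String × String)))) : Decidable (Pre_diff_sbom before_sbom after_sbom) := by unfold Pre_diff_sbom; infer_instance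

def pvWitness_diff_sbom : (List (String × List (List (String × String)))) × (List (String × List (List (String × String)))) :=
  ([("components", [[("name", "a"), ("version", "1")], [("name", "b"), ("type", "app"), ("version", "2")]])],
   [("components", [[("name", "a"), ("version", "2")], [("name", "c"), ("version", "1")]])])

def Spec_diff_sbom (before_sbom : List (String × List (List (String × String)))) (after_sbom : List (String × List (List (String × String)))) (out : List (String × List (List (String × String)))) : Prop := out = diff_sbom_alt before_sbom after_sbom
instance (before_sbom : List (String × List (List (String × String)))) (after_sbom : List (String × List (List (String × String)))) (out : List (String × List (List (String × String)))) : Decidable (Spec_diff_sbom before_sbom after_sbom out) := by unfold Spec_diff_sbom; infer_instance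

-- ===== CLAIM (what is proved, stated in full; the proofs are below) =====
def Claim_equal_diff_sbom : Prop := ∀ (before_sbom : List (String × List (List (String × String)))) (after_sbom : List (String × List (List (String × String)))), Dom_diff_sbom before_sbom after_sbom → Pre_diff_sbom before_sbom after_sbom → Spec_diff_sbom before_sbom after_sbom (diff_sbom before_sbom after_sbom)

-- ===== LEMMAS AND PROOFS =====

-- the shape of B's merged dict, as a function of A's two side dicts
def pvF (bd ad : PySem.Dict (String × String) (Option String)) :
    List ((String × String) × (Option (Option String) × Option (Option String))) :=
  bd.items.map (fun kv => (kv.1, (some kv.2, ad.get? kv.1)))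
  ++ (ad.items.filter (fun kv => !(bd.contains kv.1))).map (fun kv => (kv.1, (none, some kv.2)))

-- A's load loop is the plain insert fold over B's extracted stream
theorem pv_load_eq (l : List (List (String × String)))
    (d : PySem.Dict (String × String) (Option String)) :
    l.foldl (fun d comp => match pvKeyVer comp with | some kv => d.insert kv.1 kv.2 | none => d) d
    = (l.filterMap pvKeyVer).foldl (fun d p => d.insert p.1 p.2) d := by
  induction l generalizing d with
  | nil => rfl
  | cons c l ih =>
    cases h : pvKeyVer c <;> simp [h, ih]

theorem pv_phase1_step
    (m : PySem.Dict (String × String) (Option (Option String) × Option (Option String)))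
    (d : PySem.Dict (String × String) (Option String)) (k : String × String)
    (v : Option String)
    (h : m.items = d.items.map (fun kv => (kv.1, ((some kv.2 : Option (Option String)), (none : Option (Option String)))))) :
    (m.insert k ((some v : Option (Option String)), (none : Option (Option String)))).items
    = (d.insert k v).items.map (fun kv => (kv.1, (some kv.2, none))) := by
  have hkeys : m.keys = d.keys := by
    show m.items.map (·.1) = d.items.map (·.1)
    rw [h, List.map_map]; rfl
  have hc : m.contains k = d.contains k := by
    rw [PySem.Dict.contains_eq_decide_mem_keys, PySem.Dict.contains_eq_decide_mem_keys, hkeys]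
  cases hd : d.contains k with
  | true =>
    rw [PySem.Dict.items_insert_of_contains m _ (by rw [hc, hd]),
        PySem.Dict.items_insert_of_contains d _ hd, h, List.map_map, List.map_map]
    apply List.map_congr_left
    intro kv _
    by_cases hk : (kv.1 == k) = true <;> simp [Function.comp, hk]
  | false =>
    rw [PySem.Dict.items_insert_of_not_contains m _ (by rw [hc, hd]),
        PySem.Dict.items_insert_of_not_contains d _ hd, h, List.map_append]
    rfl

theorem pv_phase1 (l : List ((String × String) × Option String))
    (m : PySem.Dict (String × String) (Option (Option String) × Option (Option String)))
    (d : PySem.Dict (String × String) (Option String))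
    (h : m.items = d.items.map (fun kv => (kv.1, ((some kv.2 : Option (Option String)), (none : Option (Option String)))))) :
    (l.foldl (fun m p => m.insert p.1 ((some p.2 : Option (Option String)), (none : Option (Option String)))) m).items
    = (l.foldl (fun d p => d.insert p.1 p.2) d).items.map (fun kv => (kv.1, (some kv.2, none))) := by
  induction l generalizing m d with
  | nil => exact h
  | cons p l ih => exact ih _ _ (pv_phase1_step m d p.1 p.2 h)

theorem pv_phase2_step (bd ad : PySem.Dict (String × String) (Option String))
    (m : PySem.Dict (String × String) (Option (Option String) × Option (Option String)))
    (p : (String × String) × Option String)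
    (hbd : bd.keys.Nodup) (had : ad.keys.Nodup) (h : m.items = pvF bd ad) :
    (pvMergeStep m p).items = pvF bd (ad.insert p.1 p.2) := by
  have hkeysm : m.keys = bd.keys ++ (ad.items.filter (fun kv => !(bd.contains kv.1))).map (·.1) := by
    show m.items.map (·.1) = _
    rw [h]; unfold pvF; rw [List.map_append, List.map_map, List.map_map]; rfl
  have hsub : ∀ q ∈ ad.items.filter (fun kv => !(bd.contains kv.1)),
      bd.contains q.1 = false ∧ q ∈ ad.items := by
    intro q hq
    refine ⟨?_, List.mem_of_mem_filter hq⟩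
    have := List.of_mem_filter hq
    simpa using this
  have hnodupm : m.keys.Nodup := by
    rw [hkeysm]
    refine List.Nodup.append hbd ?_ ?_
    · have hs := List.Sublist.map (fun (x : (String × String) × Option String) => x.1)
        (List.filter_sublist :
          (ad.items.filter (fun kv => !(bd.contains kv.1))).Sublist ad.items)
      exact hs.nodup had
    · intro x hx hx2
      obtain ⟨q, hq, rfl⟩ := List.mem_map.mp hx2
      have hcq := (hsub q hq).1
      rw [PySem.Dict.contains_eq_decide_mem_keys] at hcq
      simp at hcq
      exact hcq hx
  cases hb : bd.contains p.1 with
  | true =>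
    have hp1 : p.1 ∈ bd.keys := (PySem.Dict.contains_iff_mem_keys bd p.1).mp hb
    obtain ⟨bkv, hbkv, hk1⟩ := List.mem_map.mp hp1
    have hmemm : (p.1, ((some bkv.2 : Option (Option String)), ad.get? p.1)) ∈ m.items := by
      rw [h]
      refine List.mem_append_left _ (List.mem_map.mpr ⟨bkv, hbkv, ?_⟩)
      simp [hk1]
    have hmc : m.contains p.1 = true := by
      rw [PySem.Dict.contains_iff_mem_keys, hkeysm]
      exact List.mem_append_left _ hp1
    have hgetd : m.getD p.1 (none, none) = (some bkv.2, ad.get? p.1) :=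
      PySem.Dict.getD_of_mem_items m hmemm hnodupm _
    unfold pvMergeStep
    rw [hmc, if_pos rfl, hgetd]
    rw [PySem.Dict.items_insert_of_contains m _ hmc, h]
    unfold pvF
    rw [List.map_append]
    congr 1
    · rw [List.map_map]
      apply List.map_congr_left
      intro kv hkv
      rw [PySem.Dict.get?_insert]
      by_cases hkq : kv.1 = p.1
      · have hv2 : kv.2 = bkv.2 := by
          have e1 := PySem.Dict.get?_of_mem_items bd hkv hbd
          have e2 := PySem.Dict.get?_of_mem_items bd hbkv hbd
          rw [hkq] at e1
          rw [hk1] at e2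
          rw [e1] at e2
          exact Option.some.inj e2
        simp [Function.comp, hkq, hv2]
      · simp [Function.comp, hkq]
    · cases ha : ad.contains p.1 with
      | true =>
        rw [PySem.Dict.items_insert_of_contains ad _ ha]
        have hcomp : ((fun kv => !(bd.contains kv.1)) ∘
            (fun q => if (q.1 == p.1) = true then (p.1, p.2) else q))
            = (fun (kv : (String × String) × Option String) => !(bd.contains kv.1)) := by
          funext q
          by_cases hq : (q.1 == p.1) = true
          · have : q.1 = p.1 := by simpa using hq
            simp [Function.comp, this]
          · simp [Function.comp, hq]
        rw [List.filter_map, hcomp, List.map_map, List.map_map]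
        apply List.map_congr_left
        intro q hq
        have hcq := (hsub q hq).1
        have hne : ¬ (q.1 = p.1) := fun e => by rw [e, hb] at hcq; cases hcq
        simp [Function.comp, hne]
      | false =>
        rw [PySem.Dict.items_insert_of_not_contains ad _ ha, List.filter_append]
        have he : List.filter (fun kv => !(bd.contains kv.1)) [(p.1, p.2)] = [] := by
          simp [hb]
        rw [he, List.append_nil, List.map_map]
        apply List.map_congr_left
        intro q hq
        have hcq := (hsub q hq).1
        have hne : ¬ (q.1 = p.1) := fun e => by rw [e, hb] at hcq; cases hcq
        simp [Function.comp, hne]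
  | false =>
    have hp1 : p.1 ∉ bd.keys := by
      intro hmem
      rw [(PySem.Dict.contains_iff_mem_keys bd p.1).mpr hmem] at hb
      cases hb
    cases ha : ad.contains p.1 with
    | true =>
      have hpa : p.1 ∈ ad.keys := (PySem.Dict.contains_iff_mem_keys ad p.1).mp ha
      obtain ⟨akv, hakv, hak1⟩ := List.mem_map.mp hpa
      have hqf : akv ∈ ad.items.filter (fun kv => !(bd.contains kv.1)) :=
        List.mem_filter.mpr ⟨hakv, by rw [hak1, hb]; rfl⟩
      have hmemm : (p.1, ((none : Option (Option String)), some akv.2)) ∈ m.items := by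
        rw [h]
        refine List.mem_append_right _ (List.mem_map.mpr ⟨akv, hqf, ?_⟩)
        simp [hak1]
      have hmc : m.contains p.1 = true := by
        rw [PySem.Dict.contains_iff_mem_keys, hkeysm]
        exact List.mem_append_right _ (List.mem_map.mpr ⟨akv, hqf, hak1⟩)
      have hgetd : m.getD p.1 (none, none) = (none, some akv.2) :=
        PySem.Dict.getD_of_mem_items m hmemm hnodupm _
      unfold pvMergeStep
      rw [hmc, if_pos rfl, hgetd]
      rw [PySem.Dict.items_insert_of_contains m _ hmc, h]
      unfold pvF
      rw [List.map_append]
      congr 1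
      · rw [List.map_map]
        apply List.map_congr_left
        intro kv hkv
        have hne : ¬ (kv.1 = p.1) := by
          intro e
          exact hp1 (e ▸ List.mem_map.mpr ⟨kv, hkv, rfl⟩)
        rw [PySem.Dict.get?_insert]
        simp [Function.comp, hne]
      · rw [PySem.Dict.items_insert_of_contains ad _ ha]
        have hcomp : ((fun kv => !(bd.contains kv.1)) ∘
            (fun q => if (q.1 == p.1) = true then (p.1, p.2) else q))
            = (fun (kv : (String × String) × Option String) => !(bd.contains kv.1)) := by
          funext q
          by_cases hq : (q.1 == p.1) = true
          · have : q.1 = p.1 := by simpa using hq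
            simp [Function.comp, this]
          · simp [Function.comp, hq]
        rw [List.filter_map, hcomp, List.map_map, List.map_map]
        apply List.map_congr_left
        intro q _
        by_cases hq : q.1 = p.1
        · simp [Function.comp, hq]
        · simp [Function.comp, hq]
    | false =>
      have hpa : p.1 ∉ ad.keys := by
        intro hmem
        rw [(PySem.Dict.contains_iff_mem_keys ad p.1).mpr hmem] at ha
        cases ha
      have hmc : m.contains p.1 = false := by
        cases hcm : m.contains p.1 with
        | false => rfl
        | true =>
          exfalso
          have := (PySem.Dict.contains_iff_mem_keys m p.1).mp hcm
          rw [hkeysm] at this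
          rcases List.mem_append.mp this with h1 | h2
          · exact hp1 h1
          · obtain ⟨q, hq, hq1⟩ := List.mem_map.mp h2
            exact hpa (hq1 ▸ List.mem_map.mpr ⟨q, List.mem_of_mem_filter hq, rfl⟩)
      unfold pvMergeStep
      rw [hmc, if_neg (by simp), PySem.Dict.items_insert_of_not_contains m _ hmc, h]
      unfold pvF
      rw [PySem.Dict.items_insert_of_not_contains ad _ ha, List.filter_append]
      have he : List.filter (fun kv => !(bd.contains kv.1)) [(p.1, p.2)] = [(p.1, p.2)] := by
        simp [hb]
      rw [he, List.map_append]
      have hpart1 : bd.items.map (fun kv => (kv.1, ((some kv.2 : Option (Option String)), (ad.insert p.1 p.2).get? kv.1)))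
          = bd.items.map (fun kv => (kv.1, ((some kv.2 : Option (Option String)), ad.get? kv.1))) := by
        apply List.map_congr_left
        intro kv hkv
        have hne : ¬ (kv.1 = p.1) := by
          intro e
          exact hp1 (e ▸ List.mem_map.mpr ⟨kv, hkv, rfl⟩)
        rw [PySem.Dict.get?_insert, if_neg hne]
      rw [hpart1, List.append_assoc]
      rfl

theorem pv_phase2 (bd : PySem.Dict (String × String) (Option String)) (hbd : bd.keys.Nodup)
    (al : List ((String × String) × Option String)) :
    ∀ (ad : PySem.Dict (String × String) (Option String))
      (m : PySem.Dict (String × String) (Option (Option String) × Option (Option String))),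
      ad.keys.Nodup → m.items = pvF bd ad →
      (al.foldl pvMergeStep m).items = pvF bd (al.foldl (fun d p => d.insert p.1 p.2) ad) := by
  induction al with
  | nil => intro ad m _ h; exact h
  | cons p al ih =>
    intro ad m had h
    exact ih _ _ (PySem.Dict.nodup_keys_insert ad p.1 p.2 had) (pv_phase2_step bd ad m p hbd had h)

-- B's classification pass over the bd-part of merged = A's removed/updated loop
theorem pv_out1 (ad : PySem.Dict (String × String) (Option String))
    (l : List ((String × String) × Option String))
    (a : List (List (String × String)))
    (ru : List (List (String × String)) × List (List (String × String))) :
    (l.map (fun kv => (kv.1, ((some kv.2 : Option (Option String)), ad.get? kv.1)))).foldl pvClassify (a, ru)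
    = (a, l.foldl
        (fun (acc : List (List (String × String)) × List (List (String × String))) kv =>
          if ad.contains kv.1 = false then
            (acc.1 ++ [pvEntryRemoved kv.1 kv.2], acc.2)
          else
            let new_ver := ad.getD kv.1 none
            if kv.2 ≠ new_ver then (acc.1, acc.2 ++ [pvEntryUpdated kv.1 kv.2 new_ver]) else acc)
        ru) := by
  induction l generalizing a ru with
  | nil => rfl
  | cons kv l ih =>
    rw [List.map_cons, List.foldl_cons, List.foldl_cons]
    cases hga : ad.get? kv.1 with
    | none =>
      have hc : ad.contains kv.1 = false := by
        rw [PySem.Dict.contains_eq_isSome_get?, hga]; rfl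
      rw [show pvClassify (a, ru) (kv.1, ((some kv.2 : Option (Option String)), none))
            = (a, (ru.1 ++ [pvEntryRemoved kv.1 kv.2], ru.2)) from rfl,
          ih, if_pos hc]
    | some nv =>
      have hc : ¬ (ad.contains kv.1 = false) := by
        rw [PySem.Dict.contains_eq_isSome_get?, hga]; simp
      have hgd : ad.getD kv.1 none = nv := by
        rw [PySem.Dict.getD_eq_get?_getD, hga]; rfl
      by_cases hne : kv.2 = nv
      · rw [show pvClassify (a, ru) (kv.1, ((some kv.2 : Option (Option String)), some nv))
              = (a, ru) from by simp [pvClassify, hne],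
            ih, if_neg hc]
        simp [hgd, hne]
      · rw [show pvClassify (a, ru) (kv.1, ((some kv.2 : Option (Option String)), some nv))
              = (a, (ru.1, ru.2 ++ [pvEntryUpdated kv.1 kv.2 nv])) from by simp [pvClassify, hne],
            ih, if_neg hc]
        simp [hgd, hne]

theorem pv_out2 (bd : PySem.Dict (String × String) (Option String))
    (l : List ((String × String) × Option String))
    (a : List (List (String × String)))
    (ru : List (List (String × String)) × List (List (String × String))) :
    ((l.filter (fun kv => !(bd.contains kv.1))).map
        (fun kv => (kv.1, ((none : Option (Option String)), some kv.2)))).foldl pvClassify (a, ru)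
    = (l.foldl
        (fun acc kv =>
          if bd.contains kv.1 = false then acc ++ [pvEntryAdded kv.1 kv.2] else acc)
        a, ru) := by
  induction l generalizing a with
  | nil => rfl
  | cons kv l ih =>
    rw [List.foldl_cons]
    cases hb : bd.contains kv.1 with
    | false =>
      rw [List.filter_cons_of_pos (by simp [hb]), List.map_cons, List.foldl_cons]
      rw [show pvClassify (a, ru) (kv.1, ((none : Option (Option String)), some kv.2))
            = (a ++ [pvEntryAdded kv.1 kv.2], ru) from rfl, ih]
      simp
    | true =>
      rw [List.filter_cons_of_neg (by simp [hb]), ih]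
      simp

-- ===== VERDICT (by name: the statement is the Claim_ definition above) =====
theorem diff_sbom_spec : Claim_equal_diff_sbom := by
  intro before_sbom after_sbom _hdom _hpre
  unfold Spec_diff_sbom
  have hloadb : pvLoadComponents before_sbom
      = (pvExtract before_sbom).foldl (fun d p => d.insert p.1 p.2) PySem.Dict.empty := by
    unfold pvLoadComponents pvExtract
    exact pv_load_eq _ _
  have hloada : pvLoadComponents after_sbom
      = (pvExtract after_sbom).foldl (fun d p => d.insert p.1 p.2) PySem.Dict.empty := by
    unfold pvLoadComponents pvExtract
    exact pv_load_eq _ _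
  have hempty : (PySem.Dict.empty : PySem.Dict (String × String) (Option String)).keys.Nodup := by
    rw [PySem.Dict.keys_empty]; exact List.nodup_nil
  have hbdnodup : (pvLoadComponents before_sbom).keys.Nodup := by
    rw [hloadb]
    exact PySem.Dict.nodup_keys_foldl_insert_key _ Prod.fst (fun _ p => p.2) _ hempty
  have hadnodup : (pvLoadComponents after_sbom).keys.Nodup := by
    rw [hloada]
    exact PySem.Dict.nodup_keys_foldl_insert_key _ Prod.fst (fun _ p => p.2) _ hempty
  have h1 : ((pvExtract before_sbom).foldl
        (fun m p => m.insert p.1 ((some p.2 : Option (Option String)), (none : Option (Option String))))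
        PySem.Dict.empty).items
      = (pvLoadComponents before_sbom).items.map (fun kv => (kv.1, (some kv.2, none))) := by
    rw [hloadb]
    exact pv_phase1 _ _ _ rfl
  have h0 : ((pvExtract before_sbom).foldl
        (fun m p => m.insert p.1 ((some p.2 : Option (Option String)), (none : Option (Option String))))
        PySem.Dict.empty).items
      = pvF (pvLoadComponents before_sbom) PySem.Dict.empty := by
    rw [h1]
    unfold pvF
    rw [show (PySem.Dict.empty : PySem.Dict (String × String) (Option String)).items = [] from rfl]
    simp [PySem.Dict.get?_empty]
  have h2 : ((pvExtract after_sbom).foldl pvMergeStep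
        ((pvExtract before_sbom).foldl
          (fun m p => m.insert p.1 ((some p.2 : Option (Option String)), (none : Option (Option String))))
          PySem.Dict.empty)).items
      = pvF (pvLoadComponents before_sbom) (pvLoadComponents after_sbom) := by
    rw [hloada]
    exact pv_phase2 _ hbdnodup _ _ _ hempty h0
  show diff_sbom before_sbom after_sbom = diff_sbom_alt before_sbom after_sbom
  simp only [diff_sbom, diff_sbom_alt]
  rw [h2]
  unfold pvF
  rw [List.foldl_append, pv_out1, pv_out2]
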